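-- pv_equiv track=rewrite | github.com/wolabal/dartlab | src/dartlab/finance/relatedPartyTx/parser.py | extractTableBlocks
-- ===== SOURCE A (Python) =====
-- def extractTableBlocks(content: str) -> list[list[str]]:
--     """content에서 |(pipe) 구분 테이블 블록들 추출."""
--     lines = content.split("\n")
--     blocks: list[list[str]] = []
--     current: list[str] = []
--     for line in lines:
--         stripped = line.strip()
--         if "|" in stripped:
--             current.append(stripped)
--         else:
--             if current:
--                 blocks.append(current)
--                 current = []
--     if current:
--         blocks.append(current)
--     return blocks
-- ===== SOURCE B (Python) =====
-- def extractTableBlocks(content: str) -> list[list[str]]: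
--     """content에서 |(pipe) 구분 테이블 블록들 추출."""
--     lines = [l.strip() for l in content.split("\n")]
--     blocks: list[list[str]] = []
--     rest = lines
--     while rest:
--         if "|" in rest[0]:
--             k = 1
--             while k < len(rest) and "|" in rest[k]:
--                 k += 1
--             blocks.append(rest[:k])
--             rest = rest[k:]
--         else:
--             rest = rest[1:]
--     return blocks
-- ===== Notes on version B (the rewrite author's own statement) =====
-- stated objective: alternative
-- what changed: Replaces A's accumulate-and-flush buffer loop (with a trailing flush after the loop) by a two-pointer run extractor: strip all lines once, then scan for each maximal run of pipe-containing lines and append it as a whole slice.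
import Mathlib
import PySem

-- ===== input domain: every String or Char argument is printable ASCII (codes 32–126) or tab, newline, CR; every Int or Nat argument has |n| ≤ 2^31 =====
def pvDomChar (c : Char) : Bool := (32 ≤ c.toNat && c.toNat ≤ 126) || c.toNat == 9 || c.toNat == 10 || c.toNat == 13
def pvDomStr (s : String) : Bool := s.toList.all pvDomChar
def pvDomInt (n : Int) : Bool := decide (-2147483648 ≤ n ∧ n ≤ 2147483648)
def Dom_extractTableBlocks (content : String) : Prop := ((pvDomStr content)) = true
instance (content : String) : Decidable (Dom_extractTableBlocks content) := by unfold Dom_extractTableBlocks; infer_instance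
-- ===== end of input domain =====

-- B replaces A's accumulate-and-flush buffer loop by a two-pointer maximal-run extractor over pre-stripped lines (alternative decomposition, same cost).


-- ===== PORT A =====
def extractTableBlocks (content : String) : List (List String) :=
  let lines := (PySem.Str.split? content "\n").getD []   -- sep "\n" ≠ "": split? is always some here
  let st := lines.foldl
    (fun (st : List (List String) × List String) line =>
      let stripped := PySem.Str.strip line
      if PySem.Str.isIn "|" stripped then (st.1, st.2 ++ [stripped])
      else if st.2 ≠ [] then (st.1 ++ [st.2], ([] : List String)) else st)
    (([] : List (List String)), ([] : List String))
  if st.2 ≠ [] then st.1 ++ [st.2] else st.1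

-- ===== PORT B =====
-- inner `while k < len(rest) and "|" in rest[k]: k += 1`
def pvCountB (rest : List String) (k : Nat) : Nat :=
  if h : k < rest.length ∧ PySem.Str.isIn "|" (PySem.List.pyGetD rest (k : Int) "") = true then
    pvCountB rest (k + 1)
  else k
termination_by rest.length - k
decreasing_by omega

theorem pvCountB_ge (rest : List String) (k : Nat) : k ≤ pvCountB rest k := by
  fun_induction pvCountB with
  | case1 h ih => omega
  | case2 h => omega

-- outer `while rest:` loop
def pvLoopB (blocks : List (List String)) (rest : List String) : List (List String) :=
  if h : rest ≠ [] then
    if PySem.Str.isIn "|" (PySem.List.pyGetD rest (0 : Int) "") then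
      let k := pvCountB rest 1
      pvLoopB (blocks ++ [PySem.List.slice rest none (some (k : Int))])
              (PySem.List.slice rest (some (k : Int)) none)
    else pvLoopB blocks (PySem.List.slice rest (some 1) none)
  else blocks
termination_by rest.length
decreasing_by
  · rw [PySem.List.slice_from_natCast]
    have h1 := pvCountB_ge rest 1
    have h2 : 0 < rest.length := List.length_pos_of_ne_nil h
    simp only [List.length_drop]; omega
  · rw [PySem.List.slice_from_one]
    have h2 : 0 < rest.length := List.length_pos_of_ne_nil h
    simp only [List.length_tail]; omega

def extractTableBlocks_alt (content : String) : List (List String) :=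
  pvLoopB [] (((PySem.Str.split? content "\n").getD []).map PySem.Str.strip)

-- ===== PRECONDITION & SPEC =====
def Spec_extractTableBlocks (content : String) (out : List (List String)) : Prop := out = extractTableBlocks_alt content
instance (content : String) (out : List (List String)) : Decidable (Spec_extractTableBlocks content out) := by unfold Spec_extractTableBlocks; infer_instance

-- ===== CLAIM (what is proved, stated in full; the proofs are below) =====
def Claim_equal_extractTableBlocks : Prop := ∀ (content : String), Dom_extractTableBlocks content → Spec_extractTableBlocks content (extractTableBlocks content)

-- ===== LEMMAS AND PROOFS =====

-- reference form: maximal pipe-runs via takeWhile/dropWhile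
def pvP (s : String) : Bool := PySem.Str.isIn "|" s

def pvRuns : List String → List (List String)
  | [] => []
  | s :: t =>
    if pvP s then (s :: t.takeWhile pvP) :: pvRuns (t.dropWhile pvP)
    else pvRuns t
termination_by ls => ls.length
decreasing_by
  · have := List.length_dropWhile_le pvP t; simp; omega
  · simp

-- take/drop by the takeWhile-prefix length (specific indices B's slices land on)
theorem pvTake_takeWhile (p : String → Bool) (l : List String) :
    l.take (l.takeWhile p).length = l.takeWhile p := by
  induction l with
  | nil => simp
  | cons a t ih => by_cases h : p a <;> simp [h, ih]

theorem pvDrop_takeWhile (p : String → Bool) (l : List String) :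
    l.drop (l.takeWhile p).length = l.dropWhile p := by
  induction l with
  | nil => simp
  | cons a t ih => by_cases h : p a <;> simp [h, ih]

theorem pvGetD_zero (s : String) (t : List String) :
    PySem.List.pyGetD (s :: t) (0 : Int) "" = s := by
  simp [pysem]

-- the inner while-loop counts up to the end of the maximal pipe-run
theorem pvCountB_eq (rest : List String) (k : Nat) (hk : k ≤ rest.length) :
    pvCountB rest k = k + ((rest.drop k).takeWhile pvP).length := by
  rw [pvCountB]
  split
  · next h =>
    have hlt : k < rest.length := h.1
    have hp : pvP rest[k] = true := by
      have h2 := h.2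
      rwa [PySem.List.pyGetD_ofNat rest k "" hlt] at h2
    rw [pvCountB_eq rest (k + 1) (by omega)]
    rw [List.drop_eq_getElem_cons hlt, List.takeWhile_cons, hp]
    simp; omega
  · next h =>
    rcases Nat.lt_or_ge k rest.length with hlt | hge
    · have hp : pvP rest[k] = false := by
        rcases Bool.eq_false_or_eq_true (pvP rest[k]) with ht | hf
        · exact absurd ⟨hlt, by rw [PySem.List.pyGetD_ofNat rest k "" hlt]; exact ht⟩ h
        · exact hf
      rw [List.drop_eq_getElem_cons hlt, List.takeWhile_cons, hp]
      simp
    · rw [List.drop_eq_nil_of_le hge]; simp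
termination_by rest.length - k

-- the outer while-loop appends exactly the maximal runs
theorem pvLoopB_eq (blocks : List (List String)) (rest : List String) :
    pvLoopB blocks rest = blocks ++ pvRuns rest := by
  cases rest with
  | nil =>
    rw [pvLoopB, dif_neg (by simp : ¬ (([] : List String) ≠ [])), pvRuns]
    simp
  | cons s t =>
    rw [pvLoopB, dif_pos (by simp : (s :: t) ≠ [])]
    split
    · next hp =>
      have hs : pvP s = true := by rw [pvP]; rwa [pvGetD_zero] at hp
      have hk : pvCountB (s :: t) 1 = 1 + (t.takeWhile pvP).length := by
        have h := pvCountB_eq (s :: t) 1 (by simp)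
        simpa using h
      show pvLoopB (blocks ++ [PySem.List.slice (s :: t) none (some ((pvCountB (s :: t) 1 : Nat) : Int))])
             (PySem.List.slice (s :: t) (some ((pvCountB (s :: t) 1 : Nat) : Int)) none)
           = blocks ++ pvRuns (s :: t)
      rw [PySem.List.slice_to_natCast, PySem.List.slice_from_natCast, hk, Nat.add_comm,
          List.take_succ_cons, pvTake_takeWhile, List.drop_succ_cons, pvDrop_takeWhile]
      rw [pvLoopB_eq (blocks ++ [s :: t.takeWhile pvP]) (t.dropWhile pvP)]
      have hruns : pvRuns (s :: t) = (s :: t.takeWhile pvP) :: pvRuns (t.dropWhile pvP) := by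
        rw [pvRuns]; simp [hs]
      rw [hruns]
      simp
    · next hp =>
      have hs : pvP s = false := by
        rcases Bool.eq_false_or_eq_true (pvP s) with ht | hf
        · exact absurd (by rw [pvGetD_zero]; exact ht) hp
        · exact hf
      rw [PySem.List.slice_from_one, List.tail_cons]
      rw [pvLoopB_eq blocks t]
      have hruns : pvRuns (s :: t) = pvRuns t := by rw [pvRuns]; simp [hs]
      rw [hruns]
termination_by rest.length
decreasing_by
  all_goals simp
  all_goals exact List.length_dropWhile_le pvP t

-- A's loop step, on an already-stripped line
def pvStep (st : List (List String) × List String) (s : String) : List (List String) × List String :=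
  if PySem.Str.isIn "|" s then (st.1, st.2 ++ [s])
  else if st.2 ≠ [] then (st.1 ++ [st.2], ([] : List String)) else st

-- A's fold-then-flush over stripped lines produces the maximal runs
theorem pvFoldA (ms : List String) : ∀ (bl : List (List String)) (cur : List String),
    (let st := ms.foldl pvStep (bl, cur); if st.2 ≠ [] then st.1 ++ [st.2] else st.1) =
      if cur = [] then bl ++ pvRuns ms
      else bl ++ ((cur ++ ms.takeWhile pvP) :: pvRuns (ms.dropWhile pvP)) := by
  induction ms with
  | nil =>
    intro bl cur
    by_cases hc : cur = [] <;> simp [hc, pvRuns]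
  | cons s t ih =>
    intro bl cur
    by_cases hs : pvP s
    · have hstep : pvStep (bl, cur) s = (bl, cur ++ [s]) := by
        rw [pvStep, if_pos (show PySem.Str.isIn "|" s = true from hs)]
      simp only [List.foldl_cons, hstep]
      rw [ih bl (cur ++ [s])]
      have hruns : pvRuns (s :: t) = (s :: t.takeWhile pvP) :: pvRuns (t.dropWhile pvP) := by
        rw [pvRuns]; simp [hs]
      by_cases hc : cur = []
      · subst hc; simp [hruns]
      · simp [hc, hs]
    · have hsf : pvP s = false := by rwa [Bool.not_eq_true] at hs
      have hruns : pvRuns (s :: t) = pvRuns t := by rw [pvRuns]; simp [hsf]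
      by_cases hc : cur = []
      · subst hc
        have hstep : pvStep (bl, ([] : List String)) s = (bl, []) := by
          rw [pvStep, if_neg (show ¬ PySem.Str.isIn "|" s = true from hs)]
          simp
        simp only [List.foldl_cons, hstep]
        rw [ih bl []]
        simp [hruns]
      · have hstep : pvStep (bl, cur) s = (bl ++ [cur], []) := by
          rw [pvStep, if_neg (show ¬ PySem.Str.isIn "|" s = true from hs)]
          simp [hc]
        simp only [List.foldl_cons, hstep]
        rw [ih (bl ++ [cur]) []]
        simp [hc, hsf, hruns]

theorem extractTableBlocks_spec : Claim_equal_extractTableBlocks := by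
  intro content _
  unfold Spec_extractTableBlocks extractTableBlocks extractTableBlocks_alt
  rw [pvLoopB_eq]
  have h := pvFoldA (((PySem.Str.split? content "\n").getD []).map PySem.Str.strip) [] []
  rw [List.foldl_map] at h
  simpa [pvStep] using h
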